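-- pv_equiv track=rewrite | github.com/caoh96/DNA-Computing | DNA Coding Excercise.py | BinarytoDNA2
-- ===== SOURCE A (Python) =====
-- def BinarytoDNA2(input_string):
--     i=0
--     DNA = []
--     while i in range(len(input_string)):
--         if (len(input_string) - i > 2):
--             if(input_string[i]== '1'):
--                 if ((input_string[i] == input_string[i+1]) and (input_string[i+1] == input_string[i+2])):
--                     DNA.append('CG')
--                     i += 3
--                 elif (input_string[i] == input_string[i+1]):
--                     DNA.append('CA')
--                     i += 2
--                 else:
--                     DNA.append('CT')
--                     i+= 1
--             else:
--                 if ((input_string[i] == input_string[i+1]) and (input_string[i+1] == input_string[i+2])):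
--                     DNA.append('G')
--                     i += 3
--                 elif (input_string[i] == input_string[i+1]):
--                     DNA.append('A')
--                     i += 2
--                 else:
--                     DNA.append('T')
--                     i+= 1
--         elif (len(input_string) - i -1 == 2):
--             if(input_string[i]== '1'):
--                 if ((input_string[i] == input_string[i+1]) and (input_string[i+1] == input_string[i+2])):
--                     DNA.append('CG')
--                     break
--                 elif (input_string[i] == input_string[i+1]):
--                     DNA.append('CA')
--                     i += 2
--                 else:
--                     DNA.append('CT')
--                     i+= 1
--             else:
--                 if ((input_string[i] == input_string[i+1]) and (input_string[i+1] == input_string[i+2])):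
--                     DNA.append('G')
--                     break
--                 elif (input_string[i] == input_string[i+1]):
--                     DNA.append('A')
--                     i += 2
--                 else:
--                     DNA.append('T')
--                     i+= 1
--         elif (len(input_string) -1-i == 1):
--             if(input_string[i]== '1'):
--                 if (input_string[i] == input_string[i+1]):
--                     DNA.append('CA')
--                     break
--                 else:
--                     DNA.append('CT')
--                     i+= 1
--             else:
--                 if (input_string[i] == input_string[i+1]):
--                     DNA.append('A')
--                     break
--                 else:
--                     DNA.append('T')
--                     i+= 1
--         else:
--             if(input_string[i] == '1'):
--                 DNA.append('CT')
--                 break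
--             else:
--                 DNA.append('T')
--                 break
--
--     return ''.join(string for string in DNA)
-- ===== SOURCE B (Python) =====
-- def BinarytoDNA2(input_string):
--     # Run-length pass: one fold over the characters keeping the current run,
--     # then arithmetic (divmod by 3) decides the tokens emitted per run.
--     def emit(c, length):
--         prefix = 'C' if c == '1' else ''
--         q, r = divmod(length, 3)
--         out = [prefix + 'G'] * q
--         if r == 2:
--             out.append(prefix + 'A')
--         elif r == 1:
--             out.append(prefix + 'T')
--         return out
--
--     tokens = []
--     run_char, run_len = None, 0
--     for ch in input_string:
--         if ch == run_char:
--             run_len += 1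
--         else:
--             if run_len:
--                 tokens.extend(emit(run_char, run_len))
--             run_char, run_len = ch, 1
--     if run_len:
--         tokens.extend(emit(run_char, run_len))
--     return ''.join(tokens)
-- ===== Notes on version B (the rewrite author's own statement) =====
-- stated objective: alternative
-- what changed: Replaced A's per-position three-character-window greedy scan (with duplicated length-case branches) by a single run-length fold: each maximal run of equal characters emits length//3 triple-tokens plus one remainder token, prefixed when the run consists of ones.
import Mathlib
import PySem

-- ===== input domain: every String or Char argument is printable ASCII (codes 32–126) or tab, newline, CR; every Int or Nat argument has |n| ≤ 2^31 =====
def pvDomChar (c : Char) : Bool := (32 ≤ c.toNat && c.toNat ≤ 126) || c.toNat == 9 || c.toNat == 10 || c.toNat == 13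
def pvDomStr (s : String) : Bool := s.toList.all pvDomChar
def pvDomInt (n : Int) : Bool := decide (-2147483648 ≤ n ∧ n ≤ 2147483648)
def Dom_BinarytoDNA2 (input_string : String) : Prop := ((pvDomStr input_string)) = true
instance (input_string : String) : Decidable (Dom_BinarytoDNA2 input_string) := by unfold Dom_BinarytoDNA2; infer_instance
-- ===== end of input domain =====

-- B is an alternative implementation: a single run-length fold emitting tokens per maximal run
-- (length//3 G-tokens plus remainder token) instead of A's per-position 3-char-window greedy scan.
-- A mutates nothing; equivalence is about the return value.

-- ===== PORT A =====
-- A's while loop over index i, transliterated as recursion on the remaining suffix of the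
-- character list (rem = input_string[i:]); each Python branch appears in the same order,
-- `rem.length` playing the role of len(input_string) - i, and rest.getD k ' ' the in-range
-- accesses input_string[i+1+k] (always in range in the branches where they are evaluated).
def pvALoop (rem : List Char) (dna : List String) : List String :=
  match rem with
  | [] => dna
  | c :: rest =>
    if rest.length + 1 > 2 then
      let d := rest.getD 0 ' '
      let e := rest.getD 1 ' '
      if c = '1' then
        if c = d ∧ d = e then pvALoop (rest.drop 2) (dna ++ ["CG"])
        else if c = d then pvALoop (rest.drop 1) (dna ++ ["CA"])
        else pvALoop rest (dna ++ ["CT"])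
      else
        if c = d ∧ d = e then pvALoop (rest.drop 2) (dna ++ ["G"])
        else if c = d then pvALoop (rest.drop 1) (dna ++ ["A"])
        else pvALoop rest (dna ++ ["T"])
    else if rest.length + 1 - 1 = 2 then
      -- dead branch in A (len-i-1 == 2 implies len-i == 3 > 2), kept for faithfulness
      let d := rest.getD 0 ' '
      let e := rest.getD 1 ' '
      if c = '1' then
        if c = d ∧ d = e then dna ++ ["CG"]
        else if c = d then pvALoop (rest.drop 1) (dna ++ ["CA"])
        else pvALoop rest (dna ++ ["CT"])
      else
        if c = d ∧ d = e then dna ++ ["G"]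
        else if c = d then pvALoop (rest.drop 1) (dna ++ ["A"])
        else pvALoop rest (dna ++ ["T"])
    else if rest.length + 1 - 1 = 1 then
      let d := rest.getD 0 ' '
      if c = '1' then
        if c = d then dna ++ ["CA"] else pvALoop rest (dna ++ ["CT"])
      else
        if c = d then dna ++ ["A"] else pvALoop rest (dna ++ ["T"])
    else
      if c = '1' then dna ++ ["CT"] else dna ++ ["T"]
  termination_by rem.length
  decreasing_by all_goals (simp; try omega)

def BinarytoDNA2 (input_string : String) : String :=
  String.join (pvALoop input_string.toList [])

-- ===== PORT B =====
-- emit(c, length) from Source B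
def pvEmit (c : Char) (len : Nat) : List String :=
  let pfx := if c = '1' then "C" else ""
  let q := len / 3
  let r := len % 3
  let out := List.replicate q (pfx ++ "G")
  if r = 2 then out ++ [pfx ++ "A"]
  else if r = 1 then out ++ [pfx ++ "T"]
  else out

-- the fold body of Source B's for-loop (state: run_char, run_len, tokens)
def pvBStep (st : Option Char × Nat × List String) (ch : Char) : Option Char × Nat × List String :=
  match st with
  | (some rc, rl, toks) =>
    if ch = rc then (some rc, rl + 1, toks)
    else (some ch, 1, toks ++ (if rl ≠ 0 then pvEmit rc rl else []))
  | (none, _, toks) => (some ch, 1, toks)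

-- final flush after the loop
def pvBFinish (st : Option Char × Nat × List String) : List String :=
  match st with
  | (some rc, rl, toks) => if rl ≠ 0 then toks ++ pvEmit rc rl else toks
  | (none, _, toks) => toks

def BinarytoDNA2_alt (input_string : String) : String :=
  String.join (pvBFinish (input_string.toList.foldl pvBStep (none, 0, [])))

-- ===== PRECONDITION & SPEC =====
def Spec_BinarytoDNA2 (input_string : String) (out : String) : Prop := out = BinarytoDNA2_alt input_string
instance (input_string : String) (out : String) : Decidable (Spec_BinarytoDNA2 input_string out) := by unfold Spec_BinarytoDNA2; infer_instance

-- ===== CLAIM (what is proved, stated in full; the proofs are below) =====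
def Claim_equal_BinarytoDNA2 : Prop := ∀ (input_string : String), Dom_BinarytoDNA2 input_string → Spec_BinarytoDNA2 input_string (BinarytoDNA2 input_string)

-- ===== LEMMAS AND PROOFS =====

-- canonical run-based token list both ports are reduced to
def pvRunTokens : List Char → List String
  | [] => []
  | c :: rest =>
    pvEmit c (1 + (rest.takeWhile (· = c)).length) ++ pvRunTokens (rest.dropWhile (· = c))
  termination_by l => l.length
  decreasing_by simp; have := List.length_dropWhile_le (p := (· = c)) (l := rest); omega

lemma pvRunTokens_cons (c : Char) (rest : List Char) :
    pvRunTokens (c :: rest) =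
      pvEmit c (1 + (rest.takeWhile (· = c)).length) ++ pvRunTokens (rest.dropWhile (· = c)) := by
  simp [pvRunTokens]

lemma pvEmit_succ3 (c : Char) (n : Nat) :
    pvEmit c (n + 3) = ((if c = '1' then "C" else "") ++ "G") :: pvEmit c n := by
  simp only [pvEmit]
  have hq : (n + 3) / 3 = n / 3 + 1 := by omega
  have hr : (n + 3) % 3 = n % 3 := by omega
  rw [hq, hr, List.replicate_succ]
  split_ifs <;> simp

lemma pvEmit_zero (c : Char) : pvEmit c 0 = [] := by simp [pvEmit]

lemma pvEmit_one (c : Char) : pvEmit c 1 = [(if c = '1' then "C" else "") ++ "T"] := by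
  simp [pvEmit]

lemma pvEmit_two (c : Char) : pvEmit c 2 = [(if c = '1' then "C" else "") ++ "A"] := by
  simp [pvEmit]

-- splitting off a (possibly empty) leading run of c
lemma pvRun_split (c : Char) (l : List Char) :
    pvEmit c ((l.takeWhile (· = c)).length) ++ pvRunTokens (l.dropWhile (· = c)) =
      pvRunTokens l := by
  cases l with
  | nil => simp [pvEmit_zero, pvRunTokens]
  | cons d l' =>
    by_cases h : d = c
    · subst h
      simp [pvRunTokens_cons, Nat.add_comm]
    · simp [h, pvEmit_zero]

lemma pvRun3 (c : Char) (r2 : List Char) :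
    pvRunTokens (c :: c :: c :: r2) =
      ((if c = '1' then "C" else "") ++ "G") :: pvRunTokens r2 := by
  rw [pvRunTokens_cons]
  simp only [List.takeWhile_cons, decide_true, if_true, List.length_cons,
             List.dropWhile_cons]
  rw [show 1 + ((r2.takeWhile (· = c)).length + 1 + 1) =
        (r2.takeWhile (· = c)).length + 3 from by omega,
      pvEmit_succ3, ← pvRun_split c r2]
  simp

lemma pvRun2 (c e : Char) (r2 : List Char) (he : ¬ e = c) :
    pvRunTokens (c :: c :: e :: r2) =
      ((if c = '1' then "C" else "") ++ "A") :: pvRunTokens (e :: r2) := by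
  rw [pvRunTokens_cons]
  simp only [List.takeWhile_cons, decide_true, if_true, he, decide_false,
             Bool.false_eq_true, if_false, List.takeWhile_nil, List.length_cons,
             List.length_nil, List.dropWhile_cons]
  rw [show 1 + (0 + 1) = 2 from rfl, pvEmit_two]
  simp [he]

lemma pvRun1 (c d : Char) (rest : List Char) (hd : ¬ d = c) :
    pvRunTokens (c :: d :: rest) =
      ((if c = '1' then "C" else "") ++ "T") :: pvRunTokens (d :: rest) := by
  rw [pvRunTokens_cons]
  simp only [List.takeWhile_cons, hd, decide_false, Bool.false_eq_true, if_false,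
             List.takeWhile_nil, List.length_nil, List.dropWhile_cons]
  rw [show (1 : Nat) + 0 = 1 from rfl, pvEmit_one]
  simp [hd]

-- main A lemma: the index loop computes the run-based tokens
lemma pvALoop_eq_aux : ∀ (n : Nat) (rem : List Char) (dna : List String), rem.length ≤ n →
    pvALoop rem dna = dna ++ pvRunTokens rem := by
  intro n
  induction n with
  | zero =>
    intro rem dna h
    have hr : rem = [] := List.eq_nil_of_length_eq_zero (by omega)
    subst hr; simp [pvALoop, pvRunTokens]
  | succ n ih =>
    intro rem dna h
    match rem with
    | [] => simp [pvALoop, pvRunTokens]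
    | [c] =>
      rw [pvALoop]
      simp [pvRunTokens_cons, pvEmit_one, pvRunTokens]
      split_ifs <;> simp_all <;> try decide
    | [c, d] =>
      rw [pvALoop]
      simp only [List.length_cons, List.length_nil]
      norm_num
      by_cases h2 : c = d
      · subst h2
        simp [pvRunTokens_cons, List.takeWhile_cons, List.dropWhile_cons,
              pvEmit_two, pvRunTokens]
        split_ifs <;> simp_all <;> try decide
      · have hd : ¬ (d = c) := fun hh => h2 hh.symm
        rw [if_neg h2, if_neg h2]
        have ih1 : ∀ t, pvALoop [d] (dna ++ [t]) = dna ++ [t] ++ pvRunTokens [d] := by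
          intro t; exact ih [d] (dna ++ [t]) (by simp only [List.length_cons, List.length_nil] at h ⊢; omega)
        simp only [pvRunTokens_cons, List.takeWhile_cons, List.dropWhile_cons, hd,
                   decide_false, pvEmit_one]
        split_ifs <;> simp_all [ih1, pvRunTokens_cons, pvEmit_one, pvRunTokens] <;> try decide
    | c :: d :: e :: r2 =>
      have hlen : r2.length + 2 ≤ n := by simp at h; omega
      have ihr : ∀ (rem' : List Char) (t : String), rem'.length ≤ n →
          pvALoop rem' (dna ++ [t]) = dna ++ [t] ++ pvRunTokens rem' :=
        fun rem' t hh => ih rem' (dna ++ [t]) hh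
      rw [pvALoop]
      simp only [List.length_cons, List.getD_cons_zero, List.getD_cons_succ]
      norm_num
      split_ifs with h1 h3 h2 h3 h2
      · obtain ⟨hcd, hde⟩ := h3; subst hcd; subst hde; subst h1
        rw [ihr r2 _ (by omega), pvRun3]
        simp
      · have hec : ¬ (e = c) := fun hh => h3 ⟨h2, h2.symm.trans hh.symm⟩
        subst h2; subst h1
        rw [ihr (e :: r2) _ (by simp; omega), pvRun2 _ _ _ hec]
        simp
      · have hdc : ¬ (d = c) := fun hh => h2 hh.symm
        subst h1
        rw [ihr (d :: e :: r2) _ (by simp; omega), pvRun1 _ _ _ hdc]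
        simp
      · obtain ⟨hcd, hde⟩ := h3; subst hcd; subst hde
        rw [ihr r2 _ (by omega), pvRun3]
        simp [h1]
      · have hec : ¬ (e = c) := fun hh => h3 ⟨h2, h2.symm.trans hh.symm⟩
        subst h2
        rw [ihr (e :: r2) _ (by simp; omega), pvRun2 _ _ _ hec]
        simp [h1]
      · have hdc : ¬ (d = c) := fun hh => h2 hh.symm
        rw [ihr (d :: e :: r2) _ (by simp; omega), pvRun1 _ _ _ hdc]
        simp [h1]

lemma pvALoop_eq (rem : List Char) (dna : List String) :
    pvALoop rem dna = dna ++ pvRunTokens rem :=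
  pvALoop_eq_aux rem.length rem dna le_rfl

-- main B lemma: the fold with an open run computes the run-based tokens
lemma pvBFold_eq (l : List Char) (c : Char) (k : Nat) (toks : List String) (hk : k ≠ 0) :
    pvBFinish (l.foldl pvBStep (some c, k, toks)) =
      toks ++ pvEmit c (k + (l.takeWhile (· = c)).length) ++ pvRunTokens (l.dropWhile (· = c)) := by
  induction l generalizing c k toks with
  | nil => simp [pvBFinish, pvRunTokens, hk]
  | cons ch l ih =>
    by_cases h : ch = c
    · subst h
      simp only [List.foldl_cons, pvBStep, ite_true]
      rw [ih ch (k+1) toks (by omega)]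
      simp [Nat.add_comm, Nat.add_assoc]
    · simp only [List.foldl_cons, pvBStep, if_neg h]
      rw [ih ch 1 _ (by omega)]
      simp [h, hk, pvRunTokens_cons]

lemma pvB_eq (l : List Char) :
    pvBFinish (l.foldl pvBStep (none, 0, [])) = pvRunTokens l := by
  cases l with
  | nil => simp [pvBFinish, pvRunTokens]
  | cons c rest =>
    simp only [List.foldl_cons, pvBStep]
    rw [pvBFold_eq rest c 1 [] (by omega), pvRunTokens_cons]
    simp

-- ===== VERDICT (by name: the statement is the Claim_ definition above) =====
theorem BinarytoDNA2_spec : Claim_equal_BinarytoDNA2 := by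
  intro s _
  unfold Spec_BinarytoDNA2 BinarytoDNA2 BinarytoDNA2_alt
  rw [pvALoop_eq, pvB_eq]
  simp
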